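-- pv_equiv track=rewrite | github.com/estraviz/codewars | 6_kyu/What Color is Your Name/string_color.py | string_color
-- ===== SOURCE A (Python) =====
-- from functools import reduce
--
-- def string_color(name):
--     if not name or len(name) < 2:
--         return None
--
--     ascii_values = [ord(letter) for letter in name]
--
--     first = check_leading_zero(hex(sum(ascii_values) % 256)[2:])
--     second = check_leading_zero(
--         hex(reduce(lambda x, y: x * y, ascii_values) % 256)[2:])
--     third = check_leading_zero(
--         hex(abs(ascii_values[0] - sum(ascii_values[1:])) % 256)[2:])
--
--     return ''.join([first, second, third])
--
-- def check_leading_zero(hex_num):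
--     return str(hex_num).rjust(2, '0').upper()
-- ===== SOURCE B (Python) =====
-- def string_color(name):
--     # Frequency-table approach: count each character once, then combine per
--     # DISTINCT character using modular exponentiation pow(v, c, 256).
--     if len(name) < 2:
--         return None
--     counts = {}
--     for ch in name:
--         counts[ch] = counts.get(ch, 0) + 1
--     total = 0
--     prod = 1
--     for ch, c in counts.items():
--         v = ord(ch)
--         total += v * c
--         prod = prod * pow(v, c, 256) % 256
--     third = abs(2 * ord(name[0]) - total) % 256
--     return format(total % 256, '02X') + format(prod, '02X') + format(third, '02X')
-- ===== Notes on version B (the rewrite author's own statement) =====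
-- stated objective: faster
-- what changed: B builds a character-frequency dictionary in one pass and combines per DISTINCT character (sum v*count; product via three-argument modular pow reduced mod 256), formatting each byte as two upper-case hex digits directly, instead of A's ASCII list, three traversals, full big-int reduce() product and hex()/rjust/upper munging.
import Mathlib
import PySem

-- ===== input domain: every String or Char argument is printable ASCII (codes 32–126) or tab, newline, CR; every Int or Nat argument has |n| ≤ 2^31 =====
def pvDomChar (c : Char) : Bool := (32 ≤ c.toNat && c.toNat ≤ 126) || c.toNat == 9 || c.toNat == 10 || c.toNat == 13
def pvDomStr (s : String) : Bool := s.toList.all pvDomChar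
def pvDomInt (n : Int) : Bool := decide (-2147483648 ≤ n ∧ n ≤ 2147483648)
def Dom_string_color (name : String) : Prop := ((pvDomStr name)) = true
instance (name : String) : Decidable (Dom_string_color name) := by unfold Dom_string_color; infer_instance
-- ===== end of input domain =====

-- B counts each character once into a frequency dictionary and combines per distinct
-- character (modular exponentiation for the product), instead of A's three full
-- traversals with a big-int reduce() product. (objective: faster)

-- ===== PORT A =====
-- lowercase hex digit of n (n < 16), as Python's hex() uses
def hexDigitLower (n : Nat) : Char :=
  if n < 10 then Char.ofNat (48 + n) else Char.ofNat (87 + n)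

-- hex digits of n, most significant first; [] for 0 (fuel = n keeps the recursion structural)
def hexDigitsGo : Nat → Nat → List Char
  | _, 0 => []
  | n, fuel + 1 => if n = 0 then [] else hexDigitsGo (n / 16) fuel ++ [hexDigitLower (n % 16)]

def hexDigitsOf (n : Nat) : List Char := hexDigitsGo n n

-- hex(n)[2:] — exact for 0 ≤ n (A only applies it to values already reduced mod 256)
def pyHexTail (n : Int) : List Char :=
  if n = 0 then ['0'] else hexDigitsOf n.toNat

-- check_leading_zero: str(h).rjust(2, '0').upper(), on the char-list side (exact: rjust pads on the left)
def checkLeadingZero (h : List Char) : List Char :=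
  PySem.Chars.upper (if h.length < 2 then List.replicate (2 - h.length) '0' ++ h else h)

def string_color (name : String) : Option String :=
  let cs := name.toList
  if cs.isEmpty || cs.length < 2 then none
  else
    let asciiValues := cs.map (fun c => (c.toNat : Int))
    let first := checkLeadingZero (pyHexTail (PySem.Int.mod asciiValues.sum 256))
    -- reduce(x*y) over the (nonempty) list: fold from the head
    let second := checkLeadingZero (pyHexTail (PySem.Int.mod
      ((asciiValues.drop 1).foldl (· * ·) (PySem.List.pyGetD asciiValues 0 0)) 256))
    let third := checkLeadingZero (pyHexTail (PySem.Int.mod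
      |PySem.List.pyGetD asciiValues 0 0 - (PySem.List.slice asciiValues (some 1) none).sum| 256))
    some (String.mk (first ++ second ++ third))

-- ===== PORT B =====
-- uppercase hex digit of n (n < 16)
def hexDigitUpper (n : Nat) : Char :=
  if n < 10 then Char.ofNat (48 + n) else Char.ofNat (55 + n)

-- format(b, '02X') — exact for 0 ≤ b < 256 (B only applies it to values reduced mod 256)
def fmt02X (b : Int) : List Char :=
  [hexDigitUpper (b.toNat / 16), hexDigitUpper (b.toNat % 16)]

def string_color_alt (name : String) : Option String :=
  let cs := name.toList
  if cs.length < 2 then none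
  else
    -- counts[ch] = counts.get(ch, 0) + 1
    let counts := cs.foldl
      (fun (d : PySem.Dict Char Int) ch => d.insert ch (d.getD ch 0 + 1)) PySem.Dict.empty
    -- for ch, c in counts.items(): total += v*c; prod = prod * pow(v, c, 256) % 256
    -- (counter values are positive, so the Nat exponent p.2.toNat is exactly Python's c)
    let tp := counts.items.foldl
      (fun (tp : Int × Int) p =>
        (tp.1 + (p.1.toNat : Int) * p.2,
         PySem.Int.mod (tp.2 * PySem.Int.powMod (p.1.toNat : Int) p.2.toNat 256) 256))
      (0, 1)
    let third := PySem.Int.mod |2 * ((PySem.List.pyGetD cs 0 ' ').toNat : Int) - tp.1| 256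
    some (String.mk (fmt02X (PySem.Int.mod tp.1 256) ++ fmt02X tp.2 ++ fmt02X third))

-- ===== PRECONDITION & SPEC =====
def Spec_string_color (name : String) (out : Option String) : Prop := out = string_color_alt name
instance (name : String) (out : Option String) : Decidable (Spec_string_color name out) := by unfold Spec_string_color; infer_instance

-- ===== CLAIM (what is proved, stated in full; the proofs are below) =====
def Claim_equal_string_color : Prop := ∀ (name : String), Dom_string_color name → Spec_string_color name (string_color name)

-- ===== LEMMAS AND PROOFS =====

-- the two byte formattings agree on every byte
set_option maxRecDepth 100000 in
lemma format_eq : ∀ (k : Fin 256),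
    checkLeadingZero (pyHexTail (k : Int)) = fmt02X (k : Int) := by
  decide

lemma format_eq_int (n : Int) (h0 : 0 ≤ n) (h1 : n < 256) :
    checkLeadingZero (pyHexTail n) = fmt02X n := by
  have : n = ((⟨n.toNat, by omega⟩ : Fin 256) : Int) := by simp; omega
  rw [this]; exact format_eq _

lemma mod256_idem (x : Int) : PySem.Int.mod (PySem.Int.mod x 256) 256 = PySem.Int.mod x 256 := by
  rw [PySem.Int.mod_eq_emod_of_pos (by norm_num), PySem.Int.mod_eq_emod_of_pos (by norm_num),
    Int.emod_emod_of_dvd _ (by norm_num)]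

-- B's fold over the items list computes the sum of v*c and the mod-256 product of v^c
lemma fold_tp (l : List (Char × Int)) : ∀ (a b : Int), PySem.Int.mod b 256 = b →
    l.foldl
      (fun (tp : Int × Int) p =>
        (tp.1 + (p.1.toNat : Int) * p.2,
         PySem.Int.mod (tp.2 * PySem.Int.powMod (p.1.toNat : Int) p.2.toNat 256) 256))
      (a, b)
    = (a + (l.map (fun p => (p.1.toNat : Int) * p.2)).sum,
       PySem.Int.mod (b * (l.map (fun p => (p.1.toNat : Int) ^ p.2.toNat)).prod) 256) := by
  induction l with
  | nil => intro a b hb; simpa using hb.symm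
  | cons p l ih =>
    intro a b hb
    rw [List.foldl_cons, ih _ _ (mod256_idem _)]
    simp only [List.map_cons, List.sum_cons, List.prod_cons, Prod.mk.injEq]
    refine ⟨by ring, ?_⟩
    rw [PySem.Int.powMod_eq]
    simp only [PySem.Int.mod_eq_emod_of_pos (by norm_num : (0:Int) < 256)]
    have hy : (((p.1.toNat : Int)) ^ p.2.toNat % 256) ≡ ((p.1.toNat : Int)) ^ p.2.toNat [ZMOD 256] :=
      Int.emod_emod_of_dvd _ dvd_rfl
    have h1 : (b * (((p.1.toNat : Int)) ^ p.2.toNat % 256) % 256) ≡ b * ((p.1.toNat : Int)) ^ p.2.toNat [ZMOD 256] :=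
      (Int.emod_emod_of_dvd _ dvd_rfl).trans (hy.mul_left b)
    rw [← Int.mul_assoc]
    exact h1.mul_right _

-- reduce(mul) from the head equals the full product
lemma reduce_prod (x : Int) (xs : List Int) :
    xs.foldl (· * ·) x = (x :: xs).prod := by
  rw [List.prod_cons]
  induction xs generalizing x with
  | nil => simp
  | cons y ys ih => simp [List.foldl_cons, ih, List.prod_cons]; ring

-- sum over the distinct characters with multiplicities = plain sum over the string
lemma sum_dedup (cs : List Char) :
    ((PySem.Set.ofList cs).map (fun k => (k.toNat : Int) * (cs.count k : Int))).sum
      = (cs.map (fun c => (c.toNat : Int))).sum := by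
  rw [Finset.sum_list_map_count cs (fun c => (c.toNat : Int))]
  rw [← List.sum_toFinset _ (PySem.Set.nodup_ofList cs)]
  rw [show (PySem.Set.ofList cs).toFinset = cs.toFinset by
    ext a; simp [PySem.Set.mem_ofList]]
  apply Finset.sum_congr rfl
  intro m _; simp; ring

-- product over the distinct characters with multiplicities = plain product over the string
lemma prod_dedup (cs : List Char) :
    ((PySem.Set.ofList cs).map (fun k => (k.toNat : Int) ^ ((cs.count k : Int)).toNat)).prod
      = (cs.map (fun c => (c.toNat : Int))).prod := by
  rw [Finset.prod_list_map_count cs (fun c => (c.toNat : Int))]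
  rw [← List.prod_toFinset _ (PySem.Set.nodup_ofList cs)]
  rw [show (PySem.Set.ofList cs).toFinset = cs.toFinset by
    ext a; simp [PySem.Set.mem_ofList]]
  apply Finset.prod_congr rfl
  intro m _; simp

-- ===== VERDICT (by name: the statement is the Claim_ definition above) =====
theorem string_color_spec : Claim_equal_string_color := by
  intro name _
  unfold Spec_string_color string_color string_color_alt
  cases hcs : name.toList with
  | nil => simp
  | cons c0 rest =>
    cases rest with
    | nil => simp
    | cons c1 rest' =>
      simp only [List.isEmpty_cons, Bool.false_or, List.length_cons]
      rw [if_neg (by simp), if_neg (by omega)]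
      -- B's counting loop is Counter(cs); its items are the distinct chars with counts
      rw [PySem.Dict.foldl_insert_getD_add_one_eq_counter, PySem.Dict.items_counter]
      rw [show ((PySem.Set.ofList (c0 :: c1 :: rest')).map
            (fun k => (k, ((c0 :: c1 :: rest').count k : Int)))).foldl _ ((0 : Int), (1 : Int))
          = _ from fold_tp _ 0 1 (by decide)]
      simp only [List.map_map]
      have hmapc : ((fun p : Char × Int => (p.1.toNat : Int) * p.2) ∘
          fun k => (k, ((c0 :: c1 :: rest').count k : Int)))
          = fun k => (k.toNat : Int) * ((c0 :: c1 :: rest').count k : Int) := rfl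
      have hmapp : ((fun p : Char × Int => (p.1.toNat : Int) ^ p.2.toNat) ∘
          fun k => (k, ((c0 :: c1 :: rest').count k : Int)))
          = fun k => (k.toNat : Int) ^ (((c0 :: c1 :: rest').count k : Int)).toNat := rfl
      rw [hmapc, hmapp, sum_dedup, prod_dedup, zero_add, one_mul]
      -- A's reduce from the head is the full product
      simp only [List.map_cons, PySem.List.pyGetD_zero_cons, List.drop_succ_cons, List.drop_zero]
      rw [reduce_prod]
      -- ascii[1:] is the tail
      have hsl : ∀ (xs : List Int), PySem.List.slice xs (some (1 : Int)) none = xs.drop 1 := by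
        intro xs; exact_mod_cast PySem.List.slice_from_natCast (xs := xs) (a := 1)
      rw [hsl]
      simp only [List.prod_cons, List.drop_succ_cons, List.drop_zero, List.sum_cons]
      -- third argument: c0 - (sum of the rest) vs 2*c0 - (full sum)
      have habs : ((c0.toNat : Int)) - (((c1.toNat : Int)) + ((rest'.map fun c => (c.toNat : Int)).sum))
          = 2 * (c0.toNat : Int) - ((c0.toNat : Int) + ((c1.toNat : Int) + ((rest'.map fun c => (c.toNat : Int)).sum))) := by ring
      rw [habs]
      -- the two byte formattings agree on each mod-256 value
      have hfmt : ∀ x : Int, checkLeadingZero (pyHexTail (PySem.Int.mod x 256)) = fmt02X (PySem.Int.mod x 256) := by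
        intro x
        exact format_eq_int _ (PySem.Int.mod_nonneg _ (by norm_num)) (PySem.Int.mod_lt _ (by norm_num))
      rw [hfmt, hfmt, hfmt]
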